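-- pv_equiv track=rewrite | github.com/camara-coder/talking-game | voice_service/app/utils/safety_filter.py | truncate_to_sentences
-- ===== SOURCE A (Python) =====
-- def truncate_to_sentences(text: str, max_sentences: int = 2) -> str:
--     """
--     Truncate text to maximum number of sentences
--
--     Args:
--         text: Text to truncate
--         max_sentences: Maximum number of sentences
--
--     Returns:
--         Truncated text
--     """
--     sentence_enders = ['.', '!', '?']
--
--     sentence_count = 0
--     truncate_pos = len(text)
--
--     for i, char in enumerate(text):
--         if char in sentence_enders:
--             sentence_count += 1
--             if sentence_count >= max_sentences:
--                 truncate_pos = i + 1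
--                 break
--
--     return text[:truncate_pos].strip()
-- ===== SOURCE B (Python) =====
-- def truncate_to_sentences(text: str, max_sentences: int = 2) -> str:
--     positions = [i for i, c in enumerate(text) if c in ('.', '!', '?')]
--     need = max(max_sentences, 1)
--     cut = positions[need - 1] + 1 if len(positions) >= need else len(text)
--     return text[:cut].strip()
-- ===== Notes on version B (the rewrite author's own statement) =====
-- stated objective: alternative
-- what changed: A walks the string keeping a running sentence counter and breaks early; B collects every sentence-ender position in one declarative pass and computes the cut index by arithmetic (need = max(max_sentences,1), cut = positions[need-1]+1 or len(text)).
import Mathlib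
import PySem

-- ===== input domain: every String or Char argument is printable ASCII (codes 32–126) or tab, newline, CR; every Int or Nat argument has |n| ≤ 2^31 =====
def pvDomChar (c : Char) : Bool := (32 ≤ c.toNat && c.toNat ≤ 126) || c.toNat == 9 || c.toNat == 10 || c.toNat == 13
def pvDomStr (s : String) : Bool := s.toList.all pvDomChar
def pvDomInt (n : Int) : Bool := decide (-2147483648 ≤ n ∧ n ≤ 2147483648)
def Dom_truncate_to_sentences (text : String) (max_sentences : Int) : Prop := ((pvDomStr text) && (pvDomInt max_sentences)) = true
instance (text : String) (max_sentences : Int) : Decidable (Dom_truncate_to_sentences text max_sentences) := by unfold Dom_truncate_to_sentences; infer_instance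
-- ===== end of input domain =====

-- B replaces A's counting loop with early break by a filter of all ender positions plus closed-form indexing (alternative decomposition, same cost).


-- ===== PORT A =====
-- sentence_enders = ['.', '!', '?']
def pvEnders : List Char := ['.', '!', '?']

-- the for-loop with break: returns some truncate_pos on break, none if the loop finishes
def pvALoop (cs : List Char) (i : Int) (cnt : Int) (m : Int) : Option Int :=
  match cs with
  | [] => none
  | c :: rest =>
      if c ∈ pvEnders then
        if cnt + 1 ≥ m then some (i + 1)
        else pvALoop rest (i + 1) (cnt + 1) m
      else pvALoop rest (i + 1) cnt m

def truncate_to_sentences (text : String) (max_sentences : Int) : String :=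
  let truncate_pos : Int := (pvALoop text.toList 0 0 max_sentences).getD (text.toList.length : Int)
  PySem.Str.strip (PySem.Str.slice text none (some truncate_pos))

-- ===== PORT B =====
def truncate_to_sentences_alt (text : String) (max_sentences : Int) : String :=
  let positions : List Int :=
    ((PySem.List.enumerate text.toList).filter (fun p => p.2 ∈ pvEnders)).map (·.1)
  let need : Int := max max_sentences 1
  let cut : Int :=
    if (positions.length : Int) ≥ need then PySem.List.pyGetD positions (need - 1) 0 + 1
    else (text.toList.length : Int)
  PySem.Str.strip (PySem.Str.slice text none (some cut))

-- ===== PRECONDITION & SPEC =====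
def Spec_truncate_to_sentences (text : String) (max_sentences : Int) (out : String) : Prop := out = truncate_to_sentences_alt text max_sentences
instance (text : String) (max_sentences : Int) (out : String) : Decidable (Spec_truncate_to_sentences text max_sentences out) := by unfold Spec_truncate_to_sentences; infer_instance

-- ===== CLAIM (what is proved, stated in full; the proofs are below) =====
def Claim_equal_truncate_to_sentences : Prop := ∀ (text : String) (max_sentences : Int), Dom_truncate_to_sentences text max_sentences → Spec_truncate_to_sentences text max_sentences (truncate_to_sentences text max_sentences)

-- ===== LEMMAS AND PROOFS =====

-- ender positions of cs, indices starting at i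
def pvPos (cs : List Char) (i : Int) : List Int :=
  match cs with
  | [] => []
  | c :: rest => if c ∈ pvEnders then i :: pvPos rest (i + 1) else pvPos rest (i + 1)

lemma pvPos_eq_filter (cs : List Char) (i : Int) :
    ((PySem.List.enumerate cs i).filter (fun p => p.2 ∈ pvEnders)).map (·.1) = pvPos cs i := by
  induction cs generalizing i with
  | nil => simp [pvPos, PySem.List.enumerate_nil]
  | cons c rest ih =>
      simp only [PySem.List.enumerate_cons, List.filter_cons, pvPos]
      by_cases h : c ∈ pvEnders <;> simp [h, ih]

lemma pvALoop_eq_pos (cs : List Char) (i cnt m : Int) :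
    pvALoop cs i cnt m = ((pvPos cs i)[(max (m - cnt) 1).toNat - 1]?).map (· + 1) := by
  induction cs generalizing i cnt with
  | nil => simp [pvALoop, pvPos]
  | cons c rest ih =>
      simp only [pvALoop, pvPos]
      by_cases h : c ∈ pvEnders
      · simp only [h, if_true]
        by_cases hb : cnt + 1 ≥ m
        · have : (max (m - cnt) 1).toNat - 1 = 0 := by omega
          simp [hb, this]
        · have hk : (max (m - cnt) 1).toNat - 1 = ((max (m - (cnt + 1)) 1).toNat - 1) + 1 := by omega
          simp only [hb, if_false, ih, hk, List.getElem?_cons_succ]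
      · simp only [h, if_false, ih]

theorem truncate_core (text : String) (m : Int) :
    truncate_to_sentences text m = truncate_to_sentences_alt text m := by
  simp only [truncate_to_sentences, truncate_to_sentences_alt]
  rw [pvPos_eq_filter, pvALoop_eq_pos]
  refine congrArg (fun p : Int => PySem.Str.strip (PySem.Str.slice text none (some p))) ?_
  set P := pvPos text.toList 0 with hP
  have hmax : max (m - 0) 1 = max m 1 := by omega
  rw [hmax]
  by_cases hlen : (P.length : Int) ≥ max m 1
  · have hk : (max m 1).toNat - 1 < P.length := by omega
    have hidx : PySem.List.pyGetD P (max m 1 - 1) 0 = P[(max m 1).toNat - 1] := by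
      have h0 : (0:Int) ≤ max m 1 - 1 := by omega
      rw [PySem.List.pyGetD_of_nonneg _ _ h0]
      have : (max m 1 - 1).toNat = (max m 1).toNat - 1 := by omega
      rw [this, List.getD_eq_getElem?_getD, List.getElem?_eq_getElem hk]
      rfl
    simp [hlen, hidx, List.getElem?_eq_getElem hk]
  · have hk : P.length ≤ (max m 1).toNat - 1 := by omega
    simp [hlen, List.getElem?_eq_none hk]

-- ===== VERDICT (by name: the statement is the Claim_ definition above) =====
theorem truncate_to_sentences_spec : Claim_equal_truncate_to_sentences := by
  intro text m _
  exact truncate_core text m
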